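-- pv_equiv track=rewrite | github.com/enricadirado/Progetto-Linguistica-Computazionale | programma1.py | Hapax1000
-- ===== SOURCE A (Python) =====
-- def Hapax1000(tokensTOT):
--     #inizializzo la lista che conterrà gli Hapax
--     hapax=[]
--     #calcolo la lista dei primi 1000 tokens
--     tokensTOT_1000=tokensTOT[0:1000]
--     #calcolo la lista delle parole tipo a partire dalla lista dei primi 1000 tokens
--     voc_1000=list(set(tokensTOT_1000))
--     #per ogni elemento nel vocabolario
--     for x in voc_1000:
--         #calcolo la frequenza della parola tipo sulla lista dei primi 1000 tokens
--         freqTok=tokensTOT_1000.count(x)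
--         #se la parola tipo ricorre solo una volta
--         if freqTok==1:
--             #aggiungo la parola tipo alla lista degli Hapax (ovvero le parole tipo la cui frequenza è pari a 1)
--             hapax.append(x)
--     #calcolo il numero di parole tipo nella lista degli Hapax
--     num_hapax_1000=len(hapax)
--     return num_hapax_1000
-- ===== SOURCE B (Python) =====
-- def Hapax1000(tokensTOT):
--     # sort the first-1000 window; equal tokens become adjacent runs,
--     # a hapax is exactly a run of length 1
--     ws = sorted(tokensTOT[0:1000])
--     n = 0
--     i = 0
--     L = len(ws)
--     while i < L:
--         j = i + 1
--         while j < L and ws[j] == ws[i]: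
--             j += 1
--         if j - i == 1:
--             n += 1
--         i = j
--     return n
-- ===== Notes on version B (the rewrite author's own statement) =====
-- stated objective: alternative
-- what changed: Replaces the set-of-types plus per-type list.count rescans with sort-then-scan: sort the 1000-token window so equal tokens are adjacent, then one linear scan counting runs of length exactly 1 (no set, no frequency table).
import Mathlib
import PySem

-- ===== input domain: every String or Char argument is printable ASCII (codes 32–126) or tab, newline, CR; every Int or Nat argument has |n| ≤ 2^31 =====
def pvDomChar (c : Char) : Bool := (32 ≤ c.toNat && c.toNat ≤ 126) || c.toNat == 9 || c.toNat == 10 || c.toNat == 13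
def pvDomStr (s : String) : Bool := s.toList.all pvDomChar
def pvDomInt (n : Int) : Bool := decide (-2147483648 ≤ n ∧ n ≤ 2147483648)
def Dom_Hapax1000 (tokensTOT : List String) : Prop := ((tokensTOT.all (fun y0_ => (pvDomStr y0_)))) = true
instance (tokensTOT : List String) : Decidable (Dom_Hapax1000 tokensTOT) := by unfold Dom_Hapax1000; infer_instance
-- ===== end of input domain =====

-- B replaces A's set-of-types + per-type .count rescans by sort-then-scan: sort the
-- 1000-token window so equal tokens form adjacent runs, then one scan counts runs of length 1.

-- ===== PORT A =====
-- hapax loop over the set; only the LENGTH of hapax is used, so set iteration order cannot matter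
def Hapax1000 (tokensTOT : List String) : Int :=
  let tokensTOT_1000 := PySem.List.slice tokensTOT (some 0) (some 1000)
  let voc_1000 : PySem.Set String := PySem.Set.ofList tokensTOT_1000
  let hapax : List String :=
    voc_1000.foldl (fun acc x => if tokensTOT_1000.count x == 1 then acc ++ [x] else acc) []
  (hapax.length : Int)

-- ===== PORT B =====
-- Source B's outer while over runs: the inner while advances j past the tokens equal to ws[i]
-- (= takeWhile (· == x)); 'j - i == 1' is exactly 'that run of equals is empty'; i := j
-- continues on the remainder (= dropWhile (· == x)).
def pvRunScan : List String → Int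
  | [] => 0
  | x :: xs =>
      (if (xs.takeWhile (· == x)).isEmpty then 1 else 0) + pvRunScan (xs.dropWhile (· == x))
termination_by l => l.length
decreasing_by
  simp only [List.length_cons]
  have := List.length_dropWhile_le (· == x) xs
  omega

def Hapax1000_alt (tokensTOT : List String) : Int :=
  pvRunScan (PySem.List.sorted (PySem.List.slice tokensTOT (some 0) (some 1000)) (fun s => s) false)

-- ===== PRECONDITION & SPEC =====
def Spec_Hapax1000 (tokensTOT : List String) (out : Int) : Prop := out = Hapax1000_alt tokensTOT
instance (tokensTOT : List String) (out : Int) : Decidable (Spec_Hapax1000 tokensTOT out) := by unfold Spec_Hapax1000; infer_instance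

-- ===== CLAIM (what is proved, stated in full; the proofs are below) =====
def Claim_equal_Hapax1000 : Prop := ∀ (tokensTOT : List String), Dom_Hapax1000 tokensTOT → Spec_Hapax1000 tokensTOT (Hapax1000 tokensTOT)

-- ===== LEMMAS AND PROOFS =====

-- the common value both programs compute: number of distinct words of the list with count 1
def pvHapaxCount (l : List String) : Int :=
  (List.countP (fun y => l.count y == 1) (PySem.List.dedup l) : Int)

-- in a ≤-sorted list, x does not survive dropping its own leading run
lemma pv_not_mem_dropWhile (x : String) :
    ∀ (xs : List String), (∀ y ∈ xs, x ≤ y) → xs.Pairwise (· ≤ ·) →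
      x ∉ xs.dropWhile (· == x) := by
  intro xs
  induction xs with
  | nil => simp
  | cons y ys ih =>
    intro hle hp
    by_cases hy : y = x
    · subst hy
      simp only [List.dropWhile_cons, beq_self_eq_true, if_pos]
      exact ih (fun z hz => hle z (List.mem_cons_of_mem _ hz)) hp.of_cons
    · have hne : (y == x) = false := by simp [hy]
      simp only [List.dropWhile_cons, hne, if_neg, Bool.false_eq_true, not_false_iff]
      intro hmem
      rcases List.mem_cons.mp hmem with h | h
      · exact hy h.symm
      · have h1 : x < y := lt_of_le_of_ne (hle y (List.mem_cons_self)) (fun e => hy e.symm)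
        have h2 : y ≤ x := (List.pairwise_cons.mp hp).1 x h
        exact absurd h2 (not_le.mpr h1)

-- one step of the run decomposition of pvHapaxCount
lemma pv_hapaxCount_cons (x : String) (xs run rest : List String)
    (hsplit : xs = run ++ rest) (hrun : ∀ y ∈ run, y = x) (hx : x ∉ rest) :
    pvHapaxCount (x :: xs)
      = (if run.isEmpty then 1 else 0) + pvHapaxCount rest := by
  have hmemdx : ∀ a, a ∈ PySem.List.dedup (x :: xs) ↔ a ∈ x :: PySem.List.dedup rest := by
    intro a
    simp only [PySem.List.mem_dedup, hsplit, List.mem_cons, List.mem_append]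
    constructor
    · rintro (h | h | h)
      · exact Or.inl h
      · exact Or.inl (hrun a h)
      · exact Or.inr (by simpa [PySem.List.mem_dedup] using h)
    · rintro (h | h)
      · exact Or.inl h
      · exact Or.inr (Or.inr (by simpa [PySem.List.mem_dedup] using h))
  have hnd1 : (PySem.List.dedup (x :: xs)).Nodup := by
    simp only [PySem.List.dedup_eq_ofList]; exact PySem.Set.nodup_ofList _
  have hnd2 : (x :: PySem.List.dedup rest).Nodup := by
    refine List.nodup_cons.mpr ⟨by simpa [PySem.List.mem_dedup] using hx, ?_⟩
    simp only [PySem.List.dedup_eq_ofList]; exact PySem.Set.nodup_ofList _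
  have hperm : (PySem.List.dedup (x :: xs)).Perm (x :: PySem.List.dedup rest) :=
    (List.perm_ext_iff_of_nodup hnd1 hnd2).mpr hmemdx
  have hcx : (x :: xs).count x = run.length + 1 := by
    have hr : run.count x = run.length :=
      List.count_eq_length.mpr (fun b hb => ((hrun b hb).symm : x = b) ▸ rfl)
    have hrest : rest.count x = 0 := List.count_eq_zero.mpr hx
    simp [hsplit, List.count_append, hr, hrest]
  have hcount : ∀ y ∈ PySem.List.dedup rest,
      (((x :: xs).count y == 1) = true ↔ ((fun z => rest.count z == 1) y) = true) := by
    intro y hy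
    have hyr : y ∈ rest := by simpa [PySem.List.mem_dedup] using hy
    have hyx : x ≠ y := fun e => hx (e ▸ hyr)
    simp only []
    have hrun0 : run.count y = 0 :=
      List.count_eq_zero.mpr (fun hyrun => hyx (hrun y hyrun).symm)
    simp [hsplit, List.count_append, hrun0, hyx]
  unfold pvHapaxCount
  rw [hperm.countP_eq, List.countP_cons]
  rw [List.countP_congr hcount]
  have hpx : ((x :: xs).count x == 1) = run.isEmpty := by
    rw [hcx]
    cases run with
    | nil => simp
    | cons a as => simp
  rw [hpx]
  cases run <;> simp [add_comm]

-- the scan over a sorted list computes pvHapaxCount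
lemma pv_runScan_eq : ∀ (l : List String), l.Pairwise (· ≤ ·) →
    pvRunScan l = pvHapaxCount l := by
  intro l
  induction l using pvRunScan.induct with
  | case1 => intro _; simp [pvRunScan, pvHapaxCount, PySem.List.dedup_eq_ofList, PySem.Set.ofList_nil]
  | case2 x xs ih =>
    intro hp
    have hle : ∀ y ∈ xs, x ≤ y := (List.pairwise_cons.mp hp).1
    have hpxs : xs.Pairwise (· ≤ ·) := (List.pairwise_cons.mp hp).2
    have hrun : ∀ y ∈ xs.takeWhile (· == x), y = x := by
      intro y hy
      exact eq_of_beq (List.mem_takeWhile_imp (p := (· == x)) hy)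
    have hx : x ∉ xs.dropWhile (· == x) := pv_not_mem_dropWhile x xs hle hpxs
    have hrest : (xs.dropWhile (· == x)).Pairwise (· ≤ ·) :=
      hpxs.sublist (List.dropWhile_sublist _)
    rw [pvRunScan,
      pv_hapaxCount_cons x xs (xs.takeWhile (· == x)) (xs.dropWhile (· == x))
        (List.takeWhile_append_dropWhile).symm hrun hx,
      ih hrest]

-- pvHapaxCount is a permutation invariant
lemma pv_hapaxCount_perm (l₁ l₂ : List String) (h : l₁.Perm l₂) :
    pvHapaxCount l₁ = pvHapaxCount l₂ := by
  unfold pvHapaxCount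
  have hmem : ∀ a, a ∈ PySem.List.dedup l₁ ↔ a ∈ PySem.List.dedup l₂ := by
    intro a; simp only [PySem.List.mem_dedup]; exact h.mem_iff
  have hnd1 : (PySem.List.dedup l₁).Nodup := by
    simp only [PySem.List.dedup_eq_ofList]; exact PySem.Set.nodup_ofList _
  have hnd2 : (PySem.List.dedup l₂).Nodup := by
    simp only [PySem.List.dedup_eq_ofList]; exact PySem.Set.nodup_ofList _
  have hperm : (PySem.List.dedup l₁).Perm (PySem.List.dedup l₂) :=
    (List.perm_ext_iff_of_nodup hnd1 hnd2).mpr hmem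
  rw [hperm.countP_eq]
  congr 1
  exact List.countP_congr (fun y _ => by rw [h.count_eq])

-- ===== VERDICT (by name: the statement is the Claim_ definition above) =====
theorem Hapax1000_spec : Claim_equal_Hapax1000 := by
  intro xs _
  unfold Spec_Hapax1000 Hapax1000 Hapax1000_alt
  simp only
  rw [PySem.List.foldl_append_if_eq_filter]
  rw [List.nil_append, ← List.countP_eq_length_filter]
  rw [pv_runScan_eq _ (PySem.List.sorted_pairwise _ _),
      pv_hapaxCount_perm _ _ (PySem.List.sorted_perm _ _ _)]
  unfold pvHapaxCount
  rw [PySem.List.dedup_eq_ofList]
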